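-- pv_equiv track=rewrite | github.com/HwangHanJae/coding_test_pratice | 프로그래머스/연습문제/124 나라의 숫자/code.py | solution
-- ===== SOURCE A (Python) =====
-- def solution(n):
--     result = ''
--     while n > 0:
--         if n % 3 == 0:
--             result += '4'
--             n  = n // 3 -1
--         else:
--             result += str(n % 3)
--             n //= 3
--     return result[::-1]
-- ===== SOURCE B (Python) =====
-- def solution(n):
--     if n <= 0:
--         return ''
--     r = n % 3
--     if r == 0:
--         return solution(n // 3 - 1) + '4'
--     return solution(n // 3) + str(r)
-- ===== Notes on version B (the rewrite author's own statement) =====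
-- stated objective: simpler
-- what changed: Replaces the while loop that accumulates digits least-significant-first and then reverses with a direct recursion on the shifted quotient that emits digits most-significant-first, eliminating the accumulator and the final reversal.
import Mathlib
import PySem

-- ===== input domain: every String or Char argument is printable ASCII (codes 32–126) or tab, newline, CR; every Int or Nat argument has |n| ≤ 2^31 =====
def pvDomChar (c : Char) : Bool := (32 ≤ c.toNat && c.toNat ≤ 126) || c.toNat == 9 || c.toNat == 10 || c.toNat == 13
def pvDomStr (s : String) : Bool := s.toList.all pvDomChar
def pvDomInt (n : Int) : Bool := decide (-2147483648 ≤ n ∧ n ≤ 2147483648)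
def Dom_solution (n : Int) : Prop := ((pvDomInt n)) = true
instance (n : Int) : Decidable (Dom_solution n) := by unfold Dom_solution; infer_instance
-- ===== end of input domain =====

-- B replaces A's accumulate-then-reverse while loop with a direct recursion emitting digits most-significant-first (objective: simpler).

-- ===== PORT A =====
-- the while loop, state (n, result); fuel = n.toNat is a totality guard only
-- (each iteration strictly decreases a positive n, so it is never exhausted)
def solutionLoop : Nat → Int → String → String
  | 0, _, result => result
  | fuel+1, n, result =>
    if n > 0 then
      if PySem.Int.mod n 3 = 0 then
        solutionLoop fuel (PySem.Int.floordiv n 3 - 1) (result ++ "4")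
      else
        solutionLoop fuel (PySem.Int.floordiv n 3) (result ++ PySem.Int.toStr (PySem.Int.mod n 3))
    else result

def solution (n : Int) : String :=
  -- result[::-1]; step = -1 ≠ 0 so slice? is always some
  ((PySem.Str.slice? (solutionLoop n.toNat n "") none none (-1)).getD "")

-- ===== PORT B =====
-- fuel = n.toNat is a totality guard only (each recursive call strictly decreases a positive n)
def solutionAltGo : Nat → Int → String
  | 0, _ => ""
  | fuel+1, n =>
    if n ≤ 0 then ""
    else
      let r := PySem.Int.mod n 3
      if r = 0 then solutionAltGo fuel (PySem.Int.floordiv n 3 - 1) ++ "4"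
      else solutionAltGo fuel (PySem.Int.floordiv n 3) ++ PySem.Int.toStr r

def solution_alt (n : Int) : String := solutionAltGo n.toNat n

-- ===== PRECONDITION & SPEC =====
def Spec_solution (n : Int) (out : String) : Prop := out = solution_alt n
instance (n : Int) (out : String) : Decidable (Spec_solution n out) := by unfold Spec_solution; infer_instance

-- ===== CLAIM (what is proved, stated in full; the proofs are below) =====
def Claim_equal_solution : Prop := ∀ (n : Int), Dom_solution n → Spec_solution n (solution n)

-- ===== LEMMAS AND PROOFS =====
theorem loop_eq (fuel : Nat) (n : Int) (s : String) (hf : n.toNat ≤ fuel) :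
    (solutionLoop fuel n s).toList = s.toList ++ (solutionAltGo fuel n).toList.reverse := by
  induction fuel generalizing n s with
  | zero =>
    have hn : ¬ n > 0 := by omega
    simp [solutionLoop, solutionAltGo]
  | succ fuel ih =>
    by_cases h : n > 0
    · have hd : PySem.Int.floordiv n 3 = n / 3 :=
        PySem.Int.floordiv_eq_ediv_of_pos (by omega)
      have hm' : PySem.Int.mod n 3 = n % 3 :=
        PySem.Int.mod_eq_emod_of_pos (by omega)
      by_cases hm : PySem.Int.mod n 3 = 0
      · have hf' : (PySem.Int.floordiv n 3 - 1).toNat ≤ fuel := by rw [hd]; omega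
        simp only [solutionLoop, solutionAltGo, h, if_true, show ¬ n ≤ 0 by omega,
          if_false, hm, if_true]
        rw [ih _ _ hf']
        simp
      · have hf' : (PySem.Int.floordiv n 3).toNat ≤ fuel := by rw [hd]; omega
        simp only [solutionLoop, solutionAltGo, h, if_true, show ¬ n ≤ 0 by omega,
          if_false, hm, if_false]
        rw [ih _ _ hf']
        rw [hm'] at hm ⊢
        have h12 : n % 3 = 1 ∨ n % 3 = 2 := by omega
        rcases h12 with h1 | h1 <;> simp [h1] <;> decide
    · simp [solutionLoop, solutionAltGo, h, show n ≤ 0 by omega]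

-- ===== VERDICT (by name: the statement is the Claim_ definition above) =====
theorem solution_spec : Claim_equal_solution := by
  intro n _
  unfold Spec_solution solution solution_alt
  rw [PySem.Str.slice?_none_none_neg_one]
  apply String.toList_injective
  simp [loop_eq n.toNat n "" le_rfl]
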